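-- pv_equiv track=rewrite | github.com/witoldzol/advent-of-code-2024 | d6.py | next_obstacle
-- ===== SOURCE A (Python) =====
-- def next_obstacle(i: int, obstacles:list[int], reverse=False) -> int:
--     sorted_obstacles = sorted(obstacles, reverse=reverse)
--     # 1 2 3
--     # 2
--     # 3 2 1
--     for x in sorted_obstacles:
--         if reverse:
--             if x < i:
--                 return x
--         else:
--             if x > i:
--                 return x
--     return -1
-- ===== SOURCE B (Python) =====
-- def next_obstacle(i: int, obstacles: list[int], reverse=False) -> int:
--     # Single pass: no sort. The nearest obstacle strictly above i is the min of
--     # the candidates above i; strictly below, the max of those below.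
--     if reverse:
--         return max((x for x in obstacles if x < i), default=-1)
--     return min((x for x in obstacles if x > i), default=-1)
-- ===== Notes on version B (the rewrite author's own statement) =====
-- stated objective: faster
-- what changed: Replaces sort-then-linear-scan with a single min/max pass over the elements strictly beyond i (default -1), eliminating the sort.
import Mathlib
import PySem

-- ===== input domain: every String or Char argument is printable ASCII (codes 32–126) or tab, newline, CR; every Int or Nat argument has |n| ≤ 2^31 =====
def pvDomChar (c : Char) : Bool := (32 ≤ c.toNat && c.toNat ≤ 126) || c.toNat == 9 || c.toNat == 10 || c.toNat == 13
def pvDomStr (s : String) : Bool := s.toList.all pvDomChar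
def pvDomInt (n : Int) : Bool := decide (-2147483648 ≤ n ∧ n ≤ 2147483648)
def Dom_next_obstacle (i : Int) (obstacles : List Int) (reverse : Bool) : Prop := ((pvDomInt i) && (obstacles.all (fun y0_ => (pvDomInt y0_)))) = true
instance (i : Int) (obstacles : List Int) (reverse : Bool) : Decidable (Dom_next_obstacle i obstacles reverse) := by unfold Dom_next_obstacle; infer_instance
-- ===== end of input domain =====

-- B replaces A's sort-then-linear-scan by a single min/max pass over the candidates (objective: faster).


-- ===== PORT A =====
-- A: sort (ascending, or descending when reverse) then return the first element
-- strictly beyond i, else -1.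
def nextObstacleScan (i : Int) (reverse : Bool) : List Int → Int
  | [] => -1
  | x :: rest =>
    if reverse then
      if x < i then x else nextObstacleScan i reverse rest
    else
      if x > i then x else nextObstacleScan i reverse rest

def next_obstacle (i : Int) (obstacles : List Int) (reverse : Bool) : Int :=
  nextObstacleScan i reverse (PySem.List.sorted obstacles (fun x => x) reverse)

-- ===== PORT B =====
-- B: one pass — min of the elements > i (or max of those < i), default -1.
def next_obstacle_alt (i : Int) (obstacles : List Int) (reverse : Bool) : Int :=
  if reverse then
    (PySem.List.max? (obstacles.filter (fun x => decide (x < i))) (fun x => x)).getD (-1)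
  else
    (PySem.List.min? (obstacles.filter (fun x => decide (x > i))) (fun x => x)).getD (-1)

-- ===== PRECONDITION & SPEC =====
def Spec_next_obstacle (i : Int) (obstacles : List Int) (reverse : Bool) (out : Int) : Prop := out = next_obstacle_alt i obstacles reverse
instance (i : Int) (obstacles : List Int) (reverse : Bool) (out : Int) : Decidable (Spec_next_obstacle i obstacles reverse out) := by unfold Spec_next_obstacle; infer_instance

-- ===== CLAIM (what is proved, stated in full; the proofs are below) =====
def Claim_equal_next_obstacle : Prop := ∀ (i : Int) (obstacles : List Int) (reverse : Bool), Dom_next_obstacle i obstacles reverse → Spec_next_obstacle i obstacles reverse (next_obstacle i obstacles reverse)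

-- ===== LEMMAS AND PROOFS =====

-- If no element of L is strictly beyond i, the scan returns -1.
theorem scan_none (i : Int) (reverse : Bool) (L : List Int)
    (h : ∀ y ∈ L, if reverse then ¬ y < i else ¬ y > i) :
    nextObstacleScan i reverse L = -1 := by
  induction L with
  | nil => rfl
  | cons x t ih =>
    have hx := h x (List.mem_cons_self ..)
    have ht : ∀ y ∈ t, if reverse then ¬ y < i else ¬ y > i :=
      fun y hy => h y (List.mem_cons_of_mem _ hy)
    cases reverse with
    | false => simp only [nextObstacleScan]; simp at hx; simp [hx, ih ht]
    | true => simp only [nextObstacleScan]; simp at hx; simp [hx, ih ht]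

-- Forward scan on an ascending list returns the least element > i, when one exists.
theorem scan_fwd (i : Int) (L : List Int) (h : L.Pairwise (· ≤ ·)) (m : Int)
    (hm : m ∈ L) (hgt : i < m) (hmin : ∀ y ∈ L, i < y → m ≤ y) :
    nextObstacleScan i false L = m := by
  induction L with
  | nil => cases hm
  | cons x t ih =>
    rw [List.pairwise_cons] at h
    simp only [nextObstacleScan]
    by_cases hx : x > i
    · simp [hx]
      have hmx : m ≤ x := hmin x (List.mem_cons_self ..) hx
      rcases List.mem_cons.mp hm with rfl | hmt
      · rfl
      · exact le_antisymm (h.1 m hmt) hmx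
    · simp [hx]
      rcases List.mem_cons.mp hm with rfl | hmt
      · exact absurd hgt hx
      · exact ih h.2 hmt (fun y hy => hmin y (List.mem_cons_of_mem _ hy))

-- Reverse scan on a descending list returns the greatest element < i, when one exists.
theorem scan_rev (i : Int) (L : List Int) (h : L.Pairwise (fun a b => b ≤ a)) (m : Int)
    (hm : m ∈ L) (hlt : m < i) (hmax : ∀ y ∈ L, y < i → y ≤ m) :
    nextObstacleScan i true L = m := by
  induction L with
  | nil => cases hm
  | cons x t ih =>
    rw [List.pairwise_cons] at h
    simp only [nextObstacleScan]
    by_cases hx : x < i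
    · simp [hx]
      have hxm : x ≤ m := hmax x (List.mem_cons_self ..) hx
      rcases List.mem_cons.mp hm with rfl | hmt
      · rfl
      · exact le_antisymm hxm (h.1 m hmt)
    · simp [hx]
      rcases List.mem_cons.mp hm with rfl | hmt
      · exact absurd hlt hx
      · exact ih h.2 hmt (fun y hy => hmax y (List.mem_cons_of_mem _ hy))

-- ===== VERDICT (by name: the statement is the Claim_ definition above) =====
theorem next_obstacle_spec : Claim_equal_next_obstacle := by
  intro i obstacles reverse _
  unfold Spec_next_obstacle next_obstacle next_obstacle_alt
  cases reverse with
  | false =>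
    simp only [Bool.false_eq_true, if_false]
    cases hC : PySem.List.min? (obstacles.filter (fun x => decide (x > i))) (fun x => x) with
    | none =>
      have hnil : obstacles.filter (fun x => decide (x > i)) = [] :=
        (PySem.List.min?_eq_none_iff ..).mp hC
      have hno : ∀ y ∈ obstacles, ¬ y > i := by
        intro y hy hgt
        have : y ∈ obstacles.filter (fun x => decide (x > i)) :=
          List.mem_filter.mpr ⟨hy, by simpa using hgt⟩
        simp [hnil] at this
      simp only [Option.getD_none]
      exact scan_none i false _ (by
        intro y hy
        have : y ∈ obstacles := (PySem.List.mem_sorted ..).mp hy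
        simpa using hno y this)
    | some m =>
      have hmem := PySem.List.min?_mem hC
      have hmf := List.mem_filter.mp hmem
      have hgt : i < m := by simpa using hmf.2
      have hmin := PySem.List.min?_isMin hC
      simp only [Option.getD_some]
      apply scan_fwd i _ (PySem.List.sorted_pairwise obstacles (fun x => x)) m
      · exact (PySem.List.mem_sorted ..).mpr hmf.1
      · exact hgt
      · intro y hy hgy
        have hyo : y ∈ obstacles := (PySem.List.mem_sorted ..).mp hy
        exact hmin y (List.mem_filter.mpr ⟨hyo, by simpa using hgy⟩)
  | true =>
    simp only [if_true]
    cases hC : PySem.List.max? (obstacles.filter (fun x => decide (x < i))) (fun x => x) with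
    | none =>
      have hnil : obstacles.filter (fun x => decide (x < i)) = [] :=
        (PySem.List.max?_eq_none_iff ..).mp hC
      have hno : ∀ y ∈ obstacles, ¬ y < i := by
        intro y hy hlt
        have : y ∈ obstacles.filter (fun x => decide (x < i)) :=
          List.mem_filter.mpr ⟨hy, by simpa using hlt⟩
        simp [hnil] at this
      simp only [Option.getD_none]
      exact scan_none i true _ (by
        intro y hy
        have : y ∈ obstacles := (PySem.List.mem_sorted ..).mp hy
        simpa using hno y this)
    | some m =>
      have hmem := PySem.List.max?_mem hC
      have hmf := List.mem_filter.mp hmem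
      have hlt : m < i := by simpa using hmf.2
      have hmax := PySem.List.max?_isMax hC
      simp only [Option.getD_some]
      apply scan_rev i _ (PySem.List.sorted_pairwise_rev obstacles (fun x => x)) m
      · exact (PySem.List.mem_sorted ..).mpr hmf.1
      · exact hlt
      · intro y hy hgy
        have hyo : y ∈ obstacles := (PySem.List.mem_sorted ..).mp hy
        exact hmax y (List.mem_filter.mpr ⟨hyo, by simpa using hgy⟩)
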